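-- pv_equiv track=rewrite | github.com/pypi-data/pypi-mirror-403 | packages/openadapt-evals/openadapt_evals-0.1.2-py3-none-any.whl/openadapt_evals/agents/retrieval_agent.py | _parse_demo_task
-- ===== SOURCE A (Python) =====
-- def _parse_demo_task(content: str) -> str:
--     """Extract task description from demo file content."""
--     for line in content.split("\n"):
--         if line.startswith("TASK:"):
--             return line[5:].strip()
--     # Fallback to first non-empty line
--     for line in content.split("\n"):
--         line = line.strip()
--         if line:
--             return line
--     return "Unknown task"
-- ===== SOURCE B (Python) =====
-- def _parse_demo_task(content: str) -> str:
--     """Extract task description from demo file content (single pass)."""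
--     fallback = None
--     for line in content.split("\n"):
--         if line.startswith("TASK:"):
--             return line[5:].strip()
--         if fallback is None:
--             stripped = line.strip()
--             if stripped:
--                 fallback = stripped
--     return fallback if fallback is not None else "Unknown task"
-- ===== Notes on version B (the rewrite author's own statement) =====
-- stated objective: simpler
-- what changed: Replaced A's two full scans of the split lines (one for a TASK: line, a second for the first non-empty line) by a single loop that returns on the first TASK: line and remembers the first non-empty stripped line as a fallback.
import Mathlib
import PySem

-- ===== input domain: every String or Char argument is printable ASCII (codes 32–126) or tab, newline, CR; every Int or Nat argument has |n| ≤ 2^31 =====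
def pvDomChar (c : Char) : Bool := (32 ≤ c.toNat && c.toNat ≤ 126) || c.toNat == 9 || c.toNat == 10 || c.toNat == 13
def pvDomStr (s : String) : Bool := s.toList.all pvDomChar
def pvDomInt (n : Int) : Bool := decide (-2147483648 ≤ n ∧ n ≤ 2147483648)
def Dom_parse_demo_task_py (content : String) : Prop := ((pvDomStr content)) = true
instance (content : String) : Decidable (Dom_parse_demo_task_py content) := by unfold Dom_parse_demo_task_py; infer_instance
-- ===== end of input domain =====

-- B replaces A's two scans over the lines by one loop with a fallback variable; objective: simpler (same cost).

-- ===== PORT A =====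
-- first loop of A: first line starting with "TASK:" gives an early return
def pvLoopA1 : List String → Option String
  | [] => none
  | l :: rest =>
    if PySem.Str.startswith l "TASK:" then some (PySem.Str.strip (PySem.Str.slice l (some 5) none))
    else pvLoopA1 rest

-- second loop of A: first non-empty stripped line
def pvLoopA2 : List String → Option String
  | [] => none
  | l :: rest =>
    let s := PySem.Str.strip l
    if s ≠ "" then some s else pvLoopA2 rest

def parse_demo_task_py (content : String) : String :=
  let lines := (PySem.Str.split? content "\n").getD []   -- sep ≠ "", so split? is always `some`
  match pvLoopA1 lines with
  | some t => t
  | none =>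
    match pvLoopA2 lines with
    | some l => l
    | none => "Unknown task"

-- ===== PORT B =====
-- single pass: TASK: line returns immediately; otherwise first non-empty stripped line is kept as fallback
def pvLoopB : List String → Option String → String
  | [], fb => fb.getD "Unknown task"
  | l :: rest, fb =>
    if PySem.Str.startswith l "TASK:" then PySem.Str.strip (PySem.Str.slice l (some 5) none)
    else
      match fb with
      | some f => pvLoopB rest (some f)
      | none =>
        let s := PySem.Str.strip l
        pvLoopB rest (if s ≠ "" then some s else none)

def parse_demo_task_py_alt (content : String) : String :=
  pvLoopB ((PySem.Str.split? content "\n").getD []) none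

-- ===== PRECONDITION & SPEC =====
def Spec_parse_demo_task_py (content : String) (out : String) : Prop := out = parse_demo_task_py_alt content
instance (content : String) (out : String) : Decidable (Spec_parse_demo_task_py content out) := by unfold Spec_parse_demo_task_py; infer_instance

-- ===== CLAIM (what is proved, stated in full; the proofs are below) =====
def Claim_equal_parse_demo_task_py : Prop := ∀ (content : String), Dom_parse_demo_task_py content → Spec_parse_demo_task_py content (parse_demo_task_py content)

-- ===== LEMMAS AND PROOFS =====

theorem pvLoopB_eq (ls : List String) (fb : Option String) :
    pvLoopB ls fb =
      match pvLoopA1 ls with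
      | some t => t
      | none => (fb.or (pvLoopA2 ls)).getD "Unknown task" := by
  induction ls generalizing fb with
  | nil => cases fb <;> simp [pvLoopB, pvLoopA1, pvLoopA2]
  | cons l rest ih =>
    by_cases h : PySem.Str.startswith l "TASK:" = true
    · unfold pvLoopB pvLoopA1
      rw [if_pos h, if_pos h]
    · have h1 : pvLoopA1 (l :: rest) = pvLoopA1 rest := by
        rw [show pvLoopA1 (l :: rest) = if PySem.Str.startswith l "TASK:" = true then
            some (PySem.Str.strip (PySem.Str.slice l (some 5) none)) else pvLoopA1 rest from rfl,
          if_neg h]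
      have h2 : pvLoopA2 (l :: rest) =
          if PySem.Str.strip l ≠ "" then some (PySem.Str.strip l) else pvLoopA2 rest := rfl
      unfold pvLoopB
      rw [if_neg h, h1]
      cases fb with
      | some f => simp only [ih]; cases pvLoopA1 rest <;> simp
      | none =>
        simp only [ih]; rw [h2]
        by_cases hs : PySem.Str.strip l ≠ ""
        · rw [if_pos hs, if_pos hs]
          cases pvLoopA1 rest <;> simp
        · rw [if_neg hs, if_neg hs]

-- ===== VERDICT (by name: the statement is the Claim_ definition above) =====
theorem parse_demo_task_py_spec : Claim_equal_parse_demo_task_py := by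
  intro content _
  unfold Spec_parse_demo_task_py parse_demo_task_py parse_demo_task_py_alt
  rw [pvLoopB_eq]
  set ls := (PySem.Str.split? content "\n").getD [] with hls
  cases hA : pvLoopA1 ls <;> cases hB : pvLoopA2 ls <;> simp [hA, hB]
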